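-- pv_equiv track=rewrite | github.com/EsosaOrumwese/fraud-detection-system | src/fraud_detection/case_trigger/storage.py | _render_sql
-- ===== SOURCE A (Python) =====
-- def _render_sql(sql: str, backend: str) -> str:
--     if backend == "postgres":
--         rendered = sql
--         for idx in range(1, 31):
--             rendered = rendered.replace(f"{{p{idx}}}", f"${idx}")
--         return rendered
--     rendered = sql
--     for idx in range(1, 31):
--         rendered = rendered.replace(f"{{p{idx}}}", "?")
--     return rendered
-- ===== SOURCE B (Python) =====
-- import re
--
--
-- def _render_sql(sql: str, backend: str) -> str:
--     """Single regex pass instead of 30 sequential str.replace passes."""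
--
--     def repl(m: "re.Match[str]") -> str:
--         g = m.group(1)
--         i = int(g)
--         if 1 <= i <= 30 and g == str(i):
--             return f"${i}" if backend == "postgres" else "?"
--         return m.group(0)
--
--     return re.sub(r"\{p(\d+)\}", repl, sql)
-- ===== Notes on version B (the rewrite author's own statement) =====
-- stated objective: faster
-- what changed: Replaces the loop of 30 sequential full-string str.replace passes by one left-to-right scan (re.sub with a callback) that substitutes each {pN} placeholder (N = 1..30, no leading zero) in a single pass.
import Mathlib
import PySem

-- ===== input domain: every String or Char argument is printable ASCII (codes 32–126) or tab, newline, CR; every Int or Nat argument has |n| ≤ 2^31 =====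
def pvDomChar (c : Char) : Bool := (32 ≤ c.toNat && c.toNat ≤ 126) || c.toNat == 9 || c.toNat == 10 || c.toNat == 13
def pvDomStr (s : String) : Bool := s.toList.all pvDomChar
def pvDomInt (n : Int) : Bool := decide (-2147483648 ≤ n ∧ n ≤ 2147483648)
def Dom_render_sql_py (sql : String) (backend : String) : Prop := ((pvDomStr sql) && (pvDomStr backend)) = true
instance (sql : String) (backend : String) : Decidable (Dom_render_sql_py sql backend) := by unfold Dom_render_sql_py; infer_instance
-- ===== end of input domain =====

-- B replaces A's 30 sequential full-string str.replace passes by one left-to-right scan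
-- that rewrites each {pN} placeholder (N = 1..30, written without leading zeros) in a single pass.

-- ===== PORT A =====
def render_sql_py (sql : String) (backend : String) : String :=
  if backend == "postgres" then
    (PySem.List.pyRange 1 31 1).foldl
      (fun rendered idx =>
        PySem.Str.replace rendered ("{p" ++ PySem.Int.toStr idx ++ "}") ("$" ++ PySem.Int.toStr idx))
      sql
  else
    (PySem.List.pyRange 1 31 1).foldl
      (fun rendered idx =>
        PySem.Str.replace rendered ("{p" ++ PySem.Int.toStr idx ++ "}") "?")
      sql

-- ===== PORT B =====
-- Source B uses re.sub(r"\{p(\d+)\}", repl, sql); PySem has no regex, so the single regex pass is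
-- ported by hand, exactly: pvMatch tries the pattern at the current position ('{', 'p', a
-- maximal nonempty digit run \d+ (digits = ASCII '0'..'9'), '}'), pvScan is re.sub's scan:
-- substitute and resume after a match, or move one character on failure.  int(g) on a
-- pure-digit group is its decimal value (pvDigitsVal); str(i) is PySem.Int.toChars.
def pvDigitsVal (ds : List Char) : Nat := ds.foldl (fun a d => a * 10 + (d.toNat - 48)) 0

def pvMatch (l : List Char) : Option (Nat × List Char) :=
  match l with
  | c1 :: c2 :: r2 =>
    if c1 = '{' ∧ c2 = 'p' then
      let rest := r2.dropWhile (fun d => d.isDigit)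
      if rest.head? = some '}' then
        let ds := r2.takeWhile (fun d => d.isDigit)
        let i := pvDigitsVal ds
        if 1 ≤ i ∧ i ≤ 30 ∧ ds = PySem.Int.toChars (i : Int) then some (i, rest.tail) else none
      else none
    else none
  | _ => none

-- termination helper for pvScan (cited by its decreasing_by)
theorem pvMatch_some_lt {l : List Char} {itl : Nat × List Char}
    (h : pvMatch l = some itl) : itl.2.length < l.length := by
  match l with
  | [] => simp [pvMatch] at h
  | [c] => simp [pvMatch] at h
  | c1 :: c2 :: r2 =>
    simp only [pvMatch] at h
    split_ifs at h with h1 h2 h3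
    · injection h with h4
      subst h4
      have hlen := List.length_dropWhile_le (fun d => d.isDigit) r2
      simp only [List.length_tail, List.length_cons]
      omega

def pvScan (pg : Bool) : List Char → List Char
  | [] => []
  | c :: rest =>
    match h : pvMatch (c :: rest) with
    | some itl =>
      (if pg then '$' :: PySem.Int.toChars (itl.1 : Int) else ['?']) ++ pvScan pg itl.2
    | none => c :: pvScan pg rest
termination_by l => l.length
decreasing_by
  · exact pvMatch_some_lt h
  · simp

def render_sql_py_alt (sql : String) (backend : String) : String :=
  String.ofList (pvScan (backend == "postgres") sql.toList)

-- ===== PRECONDITION & SPEC =====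
def Spec_render_sql_py (sql : String) (backend : String) (out : String) : Prop := out = render_sql_py_alt sql backend
instance (sql : String) (backend : String) (out : String) : Decidable (Spec_render_sql_py sql backend out) := by unfold Spec_render_sql_py; infer_instance

-- ===== CLAIM (what is proved, stated in full; the proofs are below) =====
def Claim_equal_render_sql_py : Prop := ∀ (sql : String) (backend : String), Dom_render_sql_py sql backend → Spec_render_sql_py sql backend (render_sql_py sql backend)

-- ===== LEMMAS AND PROOFS =====

-- the tokens {pN} (as '{' :: tail), the replacement strings, and A's loop as a fold on List Char
def pvTokTail (n : Nat) : List Char := 'p' :: (PySem.Int.toChars (n : Int) ++ ['}'])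
def pvTok (n : Nat) : List Char := '{' :: pvTokTail n
def pvRep (pg : Bool) (n : Nat) : List Char :=
  if pg then '$' :: PySem.Int.toChars (n : Int) else ['?']
def pvL30 : List Nat := List.range' 1 30

-- specification form of Python str.replace with a nonempty pattern (o :: otl)
def pvRepl (o : Char) (otl new : List Char) : List Char → List Char
  | [] => []
  | c :: t =>
    if (o :: otl).isPrefixOf (c :: t) then new ++ pvRepl o otl new (t.drop otl.length)
    else c :: pvRepl o otl new t
termination_by l => l.length
decreasing_by
  all_goals simp
  all_goals omega

def pvApp (pg : Bool) (L : List Nat) (s : List Char) : List Char :=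
  L.foldl (fun s n => pvRepl '{' (pvTokTail n) (pvRep pg n) s) s

theorem pvRepl_nil (o : Char) (otl new : List Char) : pvRepl o otl new [] = [] := by
  simp [pvRepl]

theorem pvRepl_pos (o : Char) (otl new : List Char) (c : Char) (t : List Char)
    (h : (o :: otl) <+: (c :: t)) :
    pvRepl o otl new (c :: t) = new ++ pvRepl o otl new (t.drop otl.length) := by
  rw [pvRepl]; simp [List.isPrefixOf_iff_prefix.mpr h]

theorem pvRepl_neg (o : Char) (otl new : List Char) (c : Char) (t : List Char)
    (h : ¬ (o :: otl) <+: (c :: t)) :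
    pvRepl o otl new (c :: t) = c :: pvRepl o otl new t := by
  have hb : (o :: otl).isPrefixOf (c :: t) = false := by
    rw [← Bool.not_eq_true, List.isPrefixOf_iff_prefix]; exact h
  rw [pvRepl, hb]; simp

theorem pvRepl_tok (o : Char) (otl new u : List Char) :
    pvRepl o otl new ((o :: otl) ++ u) = new ++ pvRepl o otl new u := by
  have h : (o :: otl) <+: (o :: (otl ++ u)) := ⟨u, by simp⟩
  simpa [List.drop_left] using pvRepl_pos o otl new o (otl ++ u) h

-- PySem's replace agrees with pvRepl for a nonempty pattern
theorem pv_go_spec (o : Char) (otl new : List Char) :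
    ∀ (fuel : Nat) (l acc : List Char), l.length ≤ fuel →
      PySem.Chars.replace.go (o :: otl) new fuel l acc = acc.reverse ++ pvRepl o otl new l := by
  intro fuel
  induction fuel with
  | zero =>
    intro l acc h
    have hl : l = [] := by cases l with | nil => rfl | cons a t => simp at h
    subst hl
    simp [PySem.Chars.replace.go, pvRepl_nil]
  | succ fuel ih =>
    intro l acc h
    cases l with
    | nil => simp [PySem.Chars.replace.go, pvRepl_nil]
    | cons c t =>
      rw [PySem.Chars.replace.go]
      by_cases hp : (o :: otl) <+: (c :: t)
      · have hb : (o :: otl).isPrefixOf (c :: t) = true := List.isPrefixOf_iff_prefix.mpr hp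
        rw [hb]
        simp only [if_true, List.length_cons, List.drop_succ_cons]
        rw [ih (t.drop otl.length) (new.reverse ++ acc)
              (by simp at h ⊢; omega)]
        rw [pvRepl_pos o otl new c t hp]
        simp
      · have hb : (o :: otl).isPrefixOf (c :: t) = false := by
          rw [← Bool.not_eq_true, List.isPrefixOf_iff_prefix]; exact hp
        rw [hb]
        simp only [Bool.false_eq_true, if_false]
        rw [ih t (c :: acc) (by simp at h; omega)]
        rw [pvRepl_neg o otl new c t hp]
        simp

theorem pv_replace_eq (o : Char) (otl new s : List Char) :
    PySem.Chars.replace s (o :: otl) new = pvRepl o otl new s := by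
  rw [PySem.Chars.replace]
  simp [pv_go_spec o otl new s.length s [] (le_refl _)]

-- finite facts about the thirty tokens (checked by decide)
theorem pvF_digitsB : (pvL30.all (fun n => (PySem.Int.toChars (n : Int)).all (fun c => c.isDigit)
    && !((PySem.Int.toChars (n : Int)).isEmpty))) = true := by decide

theorem pvF_digits : ∀ n ∈ pvL30,
    (∀ c ∈ PySem.Int.toChars (n : Int), c.isDigit = true) ∧
    PySem.Int.toChars (n : Int) ≠ [] := by
  intro n hn
  have h := List.all_eq_true.mp pvF_digitsB n hn
  simp only [Bool.and_eq_true, List.all_eq_true, Bool.not_eq_true'] at h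
  exact ⟨h.1, by simpa using h.2⟩

set_option maxRecDepth 10000 in
theorem pvF_val : ∀ n ∈ pvL30, pvDigitsVal (PySem.Int.toChars (n : Int)) = n := by decide

set_option maxRecDepth 10000 in
theorem pvF_pref : ∀ m ∈ pvL30, ∀ n ∈ pvL30, pvTok m <+: pvTok n → m = n := by decide

theorem pvF_nodup : pvL30.Nodup := by decide

theorem pvF_mem : ∀ n : Nat, 1 ≤ n → n ≤ 30 → n ∈ pvL30 := by
  intro n h1 h2
  have : n ∈ List.range' 1 30 := by
    rw [List.mem_range'_1]; omega
  exact this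

theorem pvF_mem_bounds : ∀ n ∈ pvL30, 1 ≤ n ∧ n ≤ 30 := by
  intro n hn
  rw [pvL30, List.mem_range'_1] at hn
  omega

-- generic prefix helpers
theorem pv_prefix_append_cases {p v u : List Char} (h : p <+: v ++ u) : p <+: v ∨ v <+: p := by
  rcases h with ⟨w, hw⟩
  rcases Nat.le_total p.length v.length with hle | hle
  · left
    have h1 : (p ++ w).take p.length = p := List.take_left
    have h2 : (v ++ u).take p.length = v.take p.length := List.take_append_of_le_length hle
    rw [hw, h2] at h1
    exact h1 ▸ List.take_prefix _ _
  · right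
    have h1 : (v ++ u).take v.length = v := List.take_left
    have h2 : (p ++ w).take v.length = p.take v.length := List.take_append_of_le_length hle
    rw [hw, h1] at h2
    exact h2.symm ▸ List.take_prefix _ _

theorem pv_not_prefix_of_head_ne {o : Char} {otl w : List Char}
    (h : w.head? ≠ some o) : ¬ (o :: otl) <+: w := by
  intro hp
  rcases hp with ⟨t, ht⟩
  subst ht
  simp at h

-- distributing pvRepl over a prefix the pattern never starts inside
theorem pv_pvRepl_distrib (o : Char) (otl new : List Char) :
    ∀ (v u : List Char), (∀ j, j < v.length → ¬ (o :: otl) <+: (v ++ u).drop j) →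
    pvRepl o otl new (v ++ u) = v ++ pvRepl o otl new u := by
  intro v
  induction v with
  | nil => intro u _; simp
  | cons a v' ih =>
    intro u h
    have h0 : ¬ (o :: otl) <+: (a :: (v' ++ u)) := by
      have := h 0 (by simp)
      simpa using this
    rw [List.cons_append, pvRepl_neg o otl new a (v' ++ u) h0, ih u ?_]
    · simp
    · intro j hj
      have := h (j + 1) (by simp; omega)
      simpa using this

-- the "firewall": replacements never create a placeholder-shaped prefix
def pvS (c : Char) : Bool := c == 'p' || c == '}' || c.isDigit

theorem pv_pres (o : Char) (otl new : List Char)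
    (hn : ∃ n0 ntl, new = n0 :: ntl ∧ pvS n0 = false) :
    ∀ (u q : List Char), (∀ c ∈ q, pvS c = true) → q ≠ [] →
      q <+: pvRepl o otl new u → q <+: u := by
  intro u
  induction u with
  | nil =>
    intro q hq hne hpre
    rw [pvRepl_nil] at hpre
    exact absurd (List.prefix_nil.mp hpre) hne
  | cons c t ih =>
    intro q hq hne hpre
    by_cases hp : (o :: otl) <+: (c :: t)
    · rw [pvRepl_pos o otl new c t hp] at hpre
      obtain ⟨n0, ntl, hnew, hn0⟩ := hn
      cases q with
      | nil => exact absurd rfl hne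
      | cons q0 q' =>
        rcases hpre with ⟨w, hw⟩
        rw [hnew] at hw
        simp only [List.cons_append] at hw
        have hq0 : q0 = n0 := by exact (List.cons.injEq _ _ _ _ ▸ hw).1
        have : pvS q0 = true := hq q0 (by simp)
        rw [hq0, hn0] at this
        exact absurd this (by simp)
    · rw [pvRepl_neg o otl new c t hp] at hpre
      cases q with
      | nil => exact absurd rfl hne
      | cons q0 q' =>
        rcases hpre with ⟨w, hw⟩
        simp only [List.cons_append, List.cons.injEq] at hw
        obtain ⟨hq0, hw'⟩ := hw
        cases q' with
        | nil => exact ⟨t, by rw [hq0]; simp⟩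
        | cons q1 q'' =>
          have hpre' : (q1 :: q'') <+: pvRepl o otl new t := ⟨w, hw'⟩
          have := ih (q1 :: q'') (fun c hc => hq c (hq0 ▸ List.mem_cons_of_mem _ hc)) (by simp) hpre'
          rcases this with ⟨w2, hw2⟩
          exact ⟨w2, by rw [hq0]; simp [hw2]⟩

theorem pvS_true_of_digit {c : Char} (h : c.isDigit = true) : pvS c = true := by
  simp [pvS, h]

theorem pvTail_S (n : Nat) (hn : n ∈ pvL30) : ∀ c ∈ pvTokTail n, pvS c = true := by
  intro c hc
  simp only [pvTokTail, List.mem_cons, List.mem_append] at hc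
  rcases hc with rfl | hc | hc
  · decide
  · exact pvS_true_of_digit ((pvF_digits n hn).1 c hc)
  · rcases hc with rfl | hc
    · decide
    · simp at hc

theorem pvF_tok_drop1 (n : Nat) (hn : n ∈ pvL30) : ∀ c ∈ (pvTok n).drop 1, c ≠ '{' := by
  intro c hc hc2
  have : pvS c = true := pvTail_S n hn c (by simpa [pvTok] using hc)
  rw [hc2] at this
  exact absurd this (by decide)

theorem pvF_rep_no_brace (pg : Bool) (n : Nat) (hn : n ∈ pvL30) : '{' ∉ pvRep pg n := by
  intro hmem
  cases pg with
  | false => simp [pvRep] at hmem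
  | true =>
    simp only [pvRep, if_true, List.mem_cons] at hmem
    rcases hmem with h | h
    · exact absurd h (by decide)
    · have := (pvF_digits n hn).1 _ h
      exact absurd this (by decide)

theorem pvRep_head (pg : Bool) (n : Nat) :
    ∃ n0 ntl, pvRep pg n = n0 :: ntl ∧ pvS n0 = false := by
  cases pg with
  | false => exact ⟨'?', [], rfl, by decide⟩
  | true => exact ⟨'$', PySem.Int.toChars (n : Int), rfl, by decide⟩

-- A's fold on a string with no placeholder at the head
theorem pv_app_cons (pg : Bool) :
    ∀ (L : List Nat), L ⊆ pvL30 → ∀ (c : Char) (t : List Char),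
      (∀ m ∈ pvL30, ¬ pvTok m <+: (c :: t)) →
      pvApp pg L (c :: t) = c :: pvApp pg L t := by
  intro L
  induction L with
  | nil => intro _ c t _; rfl
  | cons m L' ih =>
    intro hsub c t h
    have hm : m ∈ pvL30 := hsub (by simp)
    have hnot : ¬ ('{' :: pvTokTail m) <+: (c :: t) := h m hm
    show pvApp pg (m :: L') (c :: t) = c :: pvApp pg (m :: L') t
    simp only [pvApp, List.foldl_cons]
    rw [pvRepl_neg '{' (pvTokTail m) (pvRep pg m) c t hnot]
    have hstep : ∀ m' ∈ pvL30, ¬ pvTok m' <+: c :: pvRepl '{' (pvTokTail m) (pvRep pg m) t := by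
      intro m' hm' hpre
      rcases hpre with ⟨w, hw⟩
      simp only [pvTok, List.cons_append, List.cons.injEq] at hw
      obtain ⟨hc, hw'⟩ := hw
      have htail : pvTokTail m' <+: pvRepl '{' (pvTokTail m) (pvRep pg m) t := ⟨w, hw'⟩
      have hS : ∀ ch ∈ pvTokTail m', pvS ch = true := pvTail_S m' hm'
      have hne : pvTokTail m' ≠ [] := by simp [pvTokTail]
      have hq := pv_pres '{' (pvTokTail m) (pvRep pg m) (pvRep_head pg m) t (pvTokTail m') hS hne htail
      rcases hq with ⟨w2, hw2⟩
      exact h m' hm' ⟨w2, by rw [pvTok, ← hc, List.cons_append, hw2]⟩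
    show pvApp pg L' (c :: pvRepl '{' (pvTokTail m) (pvRep pg m) t)
        = c :: pvApp pg L' (pvRepl '{' (pvTokTail m) (pvRep pg m) t)
    exact ih (fun x hx => hsub (by simp [hx])) c _ hstep

-- the pattern cannot start strictly inside a token or inside a replacement
theorem pv_no_match_inside (m' : Nat) (v u : List Char)
    (hv : ∀ ch ∈ v.drop 1, ch ≠ '{') (hj0 : ¬ pvTok m' <+: v ++ u) :
    ∀ j, j < v.length → ¬ pvTok m' <+: (v ++ u).drop j := by
  intro j hj
  rcases Nat.eq_zero_or_pos j with rfl | hjpos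
  · simpa using hj0
  · rw [List.drop_append_of_le_length (by omega)]
    have hget : v.drop j = v[j] :: v.drop (j + 1) := List.drop_eq_getElem_cons hj
    have hdd : v.drop j = (v.drop 1).drop (j - 1) := by
      rw [List.drop_drop]
      congr 1
      omega
    have hmemj : v[j] ∈ v.drop j := hget ▸ List.mem_cons_self
    have hmem : v[j] ∈ v.drop 1 := List.drop_subset _ _ (hdd ▸ hmemj)
    have hne : v[j] ≠ '{' := hv _ hmem
    apply pv_not_prefix_of_head_ne
    rw [hget]
    simp only [List.cons_append, List.head?_cons, ne_eq, Option.some.injEq]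
    exact hne

-- A's fold over a leading token and over a leading replacement
theorem pv_app_tok (pg : Bool) :
    ∀ (L : List Nat), L ⊆ pvL30 → ∀ n, n ∈ pvL30 → n ∉ L → ∀ (v : List Char),
      pvApp pg L (pvTok n ++ v) = pvTok n ++ pvApp pg L v := by
  intro L
  induction L with
  | nil => intro _ n _ _ v; rfl
  | cons m L' ih =>
    intro hsub n hn hnmem v
    have hm : m ∈ pvL30 := hsub (by simp)
    have hne : m ≠ n := by rintro rfl; exact hnmem (by simp)
    simp only [pvApp, List.foldl_cons]
    have hd : pvRepl '{' (pvTokTail m) (pvRep pg m) (pvTok n ++ v)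
        = pvTok n ++ pvRepl '{' (pvTokTail m) (pvRep pg m) v := by
      have := pv_pvRepl_distrib '{' (pvTokTail m) (pvRep pg m) (pvTok n) v ?_
      · simpa [pvTok] using this
      · apply pv_no_match_inside m (pvTok n) v (pvF_tok_drop1 n hn)
        intro hpre
        rcases pv_prefix_append_cases hpre with h1 | h1
        · exact hne (pvF_pref m hm n hn h1)
        · exact hne (pvF_pref n hn m hm h1).symm
    rw [hd]
    exact ih (fun x hx => hsub (by simp [hx])) n hn (fun hx => hnmem (by simp [hx])) _

theorem pv_app_rep (pg : Bool) :
    ∀ (L : List Nat), L ⊆ pvL30 → ∀ n, n ∈ pvL30 → ∀ (v : List Char),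
      pvApp pg L (pvRep pg n ++ v) = pvRep pg n ++ pvApp pg L v := by
  intro L
  induction L with
  | nil => intro _ n _ v; rfl
  | cons m L' ih =>
    intro hsub n hn v
    have hm : m ∈ pvL30 := hsub (by simp)
    simp only [pvApp, List.foldl_cons]
    have hd : pvRepl '{' (pvTokTail m) (pvRep pg m) (pvRep pg n ++ v)
        = pvRep pg n ++ pvRepl '{' (pvTokTail m) (pvRep pg m) v := by
      apply pv_pvRepl_distrib
      intro j hj
      rw [List.drop_append_of_le_length (by omega)]
      have hget : (pvRep pg n).drop j = (pvRep pg n)[j] :: (pvRep pg n).drop (j + 1) :=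
        List.drop_eq_getElem_cons hj
      have hne : (pvRep pg n)[j] ≠ '{' := by
        intro hb
        exact pvF_rep_no_brace pg n hn (hb ▸ List.getElem_mem hj)
      apply pv_not_prefix_of_head_ne
      rw [hget]
      simp only [List.cons_append, List.head?_cons, ne_eq, Option.some.injEq]
      exact hne
    rw [hd]
    show pvApp pg L' (pvRep pg n ++ pvRepl '{' (pvTokTail m) (pvRep pg m) v)
        = pvRep pg n ++ pvApp pg L' (pvRepl '{' (pvTokTail m) (pvRep pg m) v)
    exact ih (fun x hx => hsub (by simp [hx])) n hn _

theorem pv_app_nil (pg : Bool) : ∀ (L : List Nat), pvApp pg L [] = [] := by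
  intro L
  induction L with
  | nil => rfl
  | cons m L' ih => simp only [pvApp, List.foldl_cons, pvRepl_nil] at ih ⊢; exact ih

theorem pv_takeWhile_append {p : Char → Bool} {ds : List Char} {x : Char} {r : List Char}
    (h : ∀ c ∈ ds, p c = true) (hx : p x = false) :
    (ds ++ x :: r).takeWhile p = ds ∧ (ds ++ x :: r).dropWhile p = x :: r := by
  induction ds with
  | nil => simp [List.takeWhile, List.dropWhile, hx]
  | cons a ds' ih =>
    have ha : p a = true := h a (by simp)
    have ih' := ih (fun c hc => h c (by simp [hc]))
    simp [List.takeWhile_cons, List.dropWhile_cons, ha, ih'.1, ih'.2]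

-- computation rules for pvScan and a characterisation of pvMatch
theorem pvScan_nil (pg : Bool) : pvScan pg [] = [] := by simp [pvScan]

theorem pvScan_some (pg : Bool) (c : Char) (rest : List Char) (i : Nat) (tl : List Char)
    (h : pvMatch (c :: rest) = some (i, tl)) :
    pvScan pg (c :: rest)
      = (if pg then '$' :: PySem.Int.toChars (i : Int) else ['?']) ++ pvScan pg tl := by
  rw [pvScan.eq_def]
  split
  · rename_i heq
    exact absurd heq (by simp)
  · rename_i c' rest' heq
    obtain ⟨hc, hr⟩ : c' = c ∧ rest' = rest := by
      injection heq with h1 h2; exact ⟨h1.symm, h2.symm⟩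
    subst hc; subst hr
    split
    · rename_i itl hm
      rw [h] at hm
      injection hm with hm2
      subst hm2
      rfl
    · rename_i hm
      rw [h] at hm
      exact absurd hm (by simp)

theorem pvScan_none (pg : Bool) (c : Char) (rest : List Char)
    (h : pvMatch (c :: rest) = none) :
    pvScan pg (c :: rest) = c :: pvScan pg rest := by
  rw [pvScan.eq_def]
  split
  · rename_i heq
    exact absurd heq (by simp)
  · rename_i c' rest' heq
    obtain ⟨hc, hr⟩ : c' = c ∧ rest' = rest := by
      injection heq with h1 h2; exact ⟨h1.symm, h2.symm⟩
    subst hc; subst hr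
    split
    · rename_i itl hm
      rw [h] at hm
      exact absurd hm (by simp)
    · rfl

theorem pvMatch_tok (n : Nat) (hn : n ∈ pvL30) (tl : List Char) :
    pvMatch (pvTok n ++ tl) = some (n, tl) := by
  obtain ⟨hdig, hne⟩ := pvF_digits n hn
  have h2 := pv_takeWhile_append (ds := PySem.Int.toChars (n : Int)) (x := '}') (r := tl)
    (fun c hc => hdig c hc) (by decide)
  have hsha : pvTok n ++ tl = '{' :: 'p' :: (PySem.Int.toChars (n : Int) ++ '}' :: tl) := by
    simp [pvTok, pvTokTail]
  rw [hsha]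
  simp only [pvMatch, and_self, if_true]
  rw [h2.1, h2.2]
  simp only [List.head?_cons, List.tail_cons]
  rw [pvF_val n hn]
  simp [(pvF_mem_bounds n hn).1, (pvF_mem_bounds n hn).2]

theorem pvMatch_eq_some {l : List Char} {i : Nat} {tl : List Char}
    (h : pvMatch l = some (i, tl)) : l = pvTok i ++ tl ∧ i ∈ pvL30 := by
  match l with
  | [] => simp [pvMatch] at h
  | [c] => simp [pvMatch] at h
  | c1 :: c2 :: r2 =>
    simp only [pvMatch] at h
    split_ifs at h with h1 h2 h3
    · obtain ⟨hc1, hc2⟩ := h1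
      obtain ⟨hb1, hb2, hb3⟩ := h3
      injection h with h4
      obtain ⟨hi, htl⟩ : pvDigitsVal (r2.takeWhile (fun d => d.isDigit)) = i ∧
          (r2.dropWhile (fun d => d.isDigit)).tail = tl := by
        constructor
        · exact congrArg Prod.fst h4
        · exact congrArg Prod.snd h4
      subst hi
      have hrest : r2.dropWhile (fun d => d.isDigit) = '}' :: tl := by
        rcases hd : r2.dropWhile (fun d => d.isDigit) with _ | ⟨x, xs⟩
        · rw [hd] at h2; simp at h2
        · rw [hd] at h2 htl
          simp at h2 htl
          rw [hd, h2, htl]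
      have hr2 : r2 = r2.takeWhile (fun d => d.isDigit) ++ '}' :: tl := by
        conv_lhs => rw [← List.takeWhile_append_dropWhile (p := fun d => d.isDigit) (l := r2)]
        rw [hrest]
      constructor
      · rw [hc1, hc2]
        conv_lhs => rw [hr2, hb3]
        simp [pvTok, pvTokTail]
      · exact pvF_mem _ hb1 hb2

-- the master equality: A's 30-pass fold equals B's single scan
theorem pv_master (pg : Bool) :
    ∀ (N : Nat) (s : List Char), s.length ≤ N → pvApp pg pvL30 s = pvScan pg s := by
  intro N
  induction N with
  | zero =>
    intro s h
    have hs : s = [] := by cases s with | nil => rfl | cons a t => simp at h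
    subst hs
    rw [pv_app_nil, pvScan_nil]
  | succ N ih =>
    intro s hs
    by_cases hEx : ∃ n, n ∈ pvL30 ∧ pvTok n <+: s
    · obtain ⟨n, hn, tl, htl⟩ := hEx
      subst htl
      obtain ⟨A1, A2, hsplit⟩ := List.append_of_mem hn
      have hnodup := pvF_nodup
      rw [hsplit] at hnodup
      rcases List.nodup_append.mp hnodup with ⟨h1, h2, hdisj⟩
      have hn1 : n ∉ A1 := fun hx => hdisj n hx n (by simp) rfl
      have hA1 : A1 ⊆ pvL30 := fun x hx => by rw [hsplit]; exact List.mem_append.mpr (Or.inl hx)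
      have hA2 : A2 ⊆ pvL30 := fun x hx => by rw [hsplit]; exact List.mem_append.mpr (Or.inr (List.mem_cons_of_mem _ hx))
      have hlen : tl.length ≤ N := by
        simp [pvTok, pvTokTail] at hs
        omega
      calc pvApp pg pvL30 (pvTok n ++ tl)
          = pvApp pg A2 (pvRepl '{' (pvTokTail n) (pvRep pg n) (pvApp pg A1 (pvTok n ++ tl))) := by
            rw [hsplit]; simp [pvApp, List.foldl_append]
        _ = pvApp pg A2 (pvRepl '{' (pvTokTail n) (pvRep pg n) (pvTok n ++ pvApp pg A1 tl)) := by
            rw [pv_app_tok pg A1 hA1 n hn hn1 tl]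
        _ = pvApp pg A2 (pvRep pg n ++ pvRepl '{' (pvTokTail n) (pvRep pg n) (pvApp pg A1 tl)) := by
            rw [show pvTok n ++ pvApp pg A1 tl = ('{' :: pvTokTail n) ++ pvApp pg A1 tl from rfl,
               pvRepl_tok]
        _ = pvRep pg n ++ pvApp pg A2 (pvRepl '{' (pvTokTail n) (pvRep pg n) (pvApp pg A1 tl)) := by
            rw [pv_app_rep pg A2 hA2 n hn]
        _ = pvRep pg n ++ pvApp pg pvL30 tl := by rw [hsplit]; simp [pvApp, List.foldl_append]
        _ = pvRep pg n ++ pvScan pg tl := by rw [ih tl hlen]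
        _ = pvScan pg (pvTok n ++ tl) := by
            have hm := pvMatch_tok n hn tl
            have hsha : pvTok n ++ tl = '{' :: (pvTokTail n ++ tl) := by simp [pvTok]
            rw [hsha] at hm ⊢
            rw [pvScan_some pg '{' (pvTokTail n ++ tl) n tl hm]
            rw [show pvRep pg n = (if pg then '$' :: PySem.Int.toChars (n : Int) else ['?']) from rfl]
    · push_neg at hEx
      cases s with
      | nil => rw [pv_app_nil, pvScan_nil]
      | cons c t =>
        have h' : ∀ m ∈ pvL30, ¬ pvTok m <+: (c :: t) := fun m hm => hEx m hm
        rw [pv_app_cons pg pvL30 (fun x hx => hx) c t h']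
        rw [ih t (by simp at hs; omega)]
        have hnone : pvMatch (c :: t) = none := by
          rcases hm : pvMatch (c :: t) with _ | ⟨i, tl⟩
          · rfl
          · exfalso
            obtain ⟨heq, hmem⟩ := pvMatch_eq_some hm
            exact h' i hmem ⟨tl, heq.symm⟩
        exact (pvScan_none pg c t hnone).symm

-- bridging the String-level ports to the List Char development
set_option maxRecDepth 10000 in
theorem pv_pyRange_eq : PySem.List.pyRange 1 31 1 = pvL30.map Int.ofNat := by decide

theorem pv_fold_toList (f : Int → String) (g : Nat → List Char)
    (hfg : ∀ k : Nat, (f (Int.ofNat k)).toList = g k) :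
    ∀ (L : List Nat) (s : String),
      (List.foldl (fun r i => PySem.Str.replace r ("{p" ++ PySem.Int.toStr i ++ "}") (f i)) s
        (L.map Int.ofNat)).toList
      = List.foldl (fun s n => pvRepl '{' (pvTokTail n) (g n) s) s.toList L := by
  intro L
  induction L with
  | nil => intro s; simp
  | cons k L' ih =>
    intro s
    rw [List.map_cons, List.foldl_cons, List.foldl_cons]
    rw [show PySem.Str.replace s ("{p" ++ PySem.Int.toStr (Int.ofNat k) ++ "}") (f (Int.ofNat k))
        = String.ofList (pvRepl '{' (pvTokTail k) (g k) s.toList) from ?_]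
    · rw [ih]
      congr 1
      simp
    · apply String.ext
      have htok : ("{p" ++ PySem.Int.toStr (Int.ofNat k) ++ "}").toList
          = '{' :: pvTokTail k := by
        simp [pvTokTail, PySem.Int.toList_toStr]
      simp only [PySem.Str.toList_replace, htok, hfg, pv_replace_eq]
      simp

theorem pv_A_toList (sql backend : String) :
    (render_sql_py sql backend).toList = pvApp (backend == "postgres") pvL30 sql.toList := by
  unfold render_sql_py pvApp
  cases hpg : (backend == "postgres") with
  | true =>
    simp only [if_true]
    rw [pv_pyRange_eq]
    exact pv_fold_toList (fun i => "$" ++ PySem.Int.toStr i) (pvRep true)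
      (fun k => by simp [pvRep, PySem.Int.toList_toStr]) pvL30 sql
  | false =>
    simp only [Bool.false_eq_true, if_false]
    rw [pv_pyRange_eq]
    exact pv_fold_toList (fun _ => "?") (pvRep false)
      (fun k => by simp [pvRep]) pvL30 sql

-- ===== VERDICT (by name: the statement is the Claim_ definition above) =====
theorem render_sql_py_spec : Claim_equal_render_sql_py := by
  intro sql backend _
  show render_sql_py sql backend = render_sql_py_alt sql backend
  have h := pv_A_toList sql backend
  rw [pv_master (backend == "postgres") sql.toList.length sql.toList (le_refl _)] at h
  have h2 : (render_sql_py_alt sql backend).toList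
      = pvScan (backend == "postgres") sql.toList := by
    simp [render_sql_py_alt]
  exact String.ext (h.trans h2.symm)
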